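-- pv_equiv track=rewrite | github.com/jaealways/PS-daily | 프로그래머스/1/42840. 모의고사/모의고사.py | solution
-- ===== SOURCE A (Python) =====
-- def solution(answers):
--     n=len(answers)
--     cor=[0,0,0]
--     for i in range(n):
--         if answers[i]==[1,2,3,4,5][i%5]:
--             cor[0]+=1
--         if answers[i]==[2,1,2,3,2,4,2,5][i%8]:
--             cor[1]+=1
--         if answers[i]==[3,3,1,1,2,2,4,4,5,5][i%10]:
--             cor[2]+=1
--     return [i+1 for i in range(3) if cor[i]==max(cor) ]
-- ===== SOURCE B (Python) =====
-- def solution(answers):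
--     def score(pat):
--         cnt = 0
--         rem = pat
--         for a in answers:
--             if not rem:
--                 rem = pat
--             p, rem = rem[0], rem[1:]
--             if a == p:
--                 cnt += 1
--         return cnt
--     cor = [score([1, 2, 3, 4, 5]),
--            score([2, 1, 2, 3, 2, 4, 2, 5]),
--            score([3, 3, 1, 1, 2, 2, 4, 4, 5, 5])]
--     m = max(cor)
--     return [i + 1 for i in range(3) if cor[i] == m]
-- ===== Notes on version B (the rewrite author's own statement) =====
-- stated objective: idiomatic
-- what changed: Replaces A's single combined pass with modular indexing answers[i]==pattern[i%len] by three independent scans, each cycling through its pattern via a refilling remainder list (no index arithmetic), then the same tie-keeping max filter.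
import Mathlib
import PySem

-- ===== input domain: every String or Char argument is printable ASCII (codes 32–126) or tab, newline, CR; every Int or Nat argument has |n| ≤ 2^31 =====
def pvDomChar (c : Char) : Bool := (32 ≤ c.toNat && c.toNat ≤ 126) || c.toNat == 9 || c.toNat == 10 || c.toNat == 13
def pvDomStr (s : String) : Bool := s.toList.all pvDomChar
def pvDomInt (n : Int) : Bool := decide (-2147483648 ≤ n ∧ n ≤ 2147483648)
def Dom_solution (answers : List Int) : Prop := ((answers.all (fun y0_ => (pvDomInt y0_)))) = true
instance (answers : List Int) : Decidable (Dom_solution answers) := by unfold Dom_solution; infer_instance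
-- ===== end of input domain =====

-- B replaces A's single combined pass with modular indexing by three independent cycling scans
-- (a refilling remainder list per pattern); objective: more idiomatic decomposition, same cost.

-- ===== PORT A =====
-- loop body of A's single pass: the three 'if answers[i]==pat[i%len]: cor[j]+=1' updates
def stepA (answers : List Int) (cor : List Int) (i : Int) : List Int :=
  let cor := if PySem.List.pyGetD answers i 0 =
                PySem.List.pyGetD [1,2,3,4,5] (PySem.Int.mod i 5) 0
             then cor.set 0 (PySem.List.pyGetD cor 0 0 + 1) else cor
  let cor := if PySem.List.pyGetD answers i 0 =
                PySem.List.pyGetD [2,1,2,3,2,4,2,5] (PySem.Int.mod i 8) 0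
             then cor.set 1 (PySem.List.pyGetD cor 1 0 + 1) else cor
  let cor := if PySem.List.pyGetD answers i 0 =
                PySem.List.pyGetD [3,3,1,1,2,2,4,4,5,5] (PySem.Int.mod i 10) 0
             then cor.set 2 (PySem.List.pyGetD cor 2 0 + 1) else cor
  cor

def solution (answers : List Int) : List Int :=
  let n : Int := answers.length
  let cor : List Int := (PySem.List.pyRange 0 n 1).foldl (stepA answers) [0,0,0]
  -- [i+1 for i in range(3) if cor[i]==max(cor)]; cor has 3 elements so max and cor[i] never raise
  (PySem.List.pyRange 0 3 1).foldl (fun acc i =>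
    if PySem.List.pyGetD cor i 0 = (PySem.List.max? cor (fun x => x)).getD 0
    then acc ++ [i+1] else acc) []

-- ===== PORT B =====
-- one step of B's score loop: refill the remainder when empty, pop its head, compare
def fB (pat : List Int) (st : Int × List Int) (a : Int) : Int × List Int :=
  let rem := if st.2.isEmpty then pat else st.2
  let p := PySem.List.pyGetD rem 0 0        -- rem[0]; rem is nonempty for the nonempty pattern literals
  let rem' := PySem.List.slice rem (some 1) none   -- rem[1:]
  (if a = p then st.1 + 1 else st.1, rem')

-- B's helper score(pat): independent cycling scan of answers against one pattern
def pyScore (answers : List Int) (pat : List Int) : Int :=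
  (answers.foldl (fB pat) (0, pat)).1

def solution_alt (answers : List Int) : List Int :=
  let cor : List Int := [pyScore answers [1,2,3,4,5],
                         pyScore answers [2,1,2,3,2,4,2,5],
                         pyScore answers [3,3,1,1,2,2,4,4,5,5]]
  let m := (PySem.List.max? cor (fun x => x)).getD 0   -- max(cor); cor has 3 elements
  (PySem.List.pyRange 0 3 1).foldl (fun acc i =>
    if PySem.List.pyGetD cor i 0 = m then acc ++ [i+1] else acc) []

-- ===== PRECONDITION & SPEC =====
def Spec_solution (answers : List Int) (out : List Int) : Prop := out = solution_alt answers
instance (answers : List Int) (out : List Int) : Decidable (Spec_solution answers out) := by unfold Spec_solution; infer_instance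

-- ===== CLAIM (what is proved, stated in full; the proofs are below) =====
def Claim_equal_solution : Prop := ∀ (answers : List Int), Dom_solution answers → Spec_solution answers (solution answers)

-- ===== LEMMAS AND PROOFS =====

-- A's step with the fetched element abstracted out (stepA answers cor i is this by rfl)
def stepA' (x : Int) (i : Int) (cor : List Int) : List Int :=
  let cor := if x = PySem.List.pyGetD [1,2,3,4,5] (PySem.Int.mod i 5) 0
             then cor.set 0 (PySem.List.pyGetD cor 0 0 + 1) else cor
  let cor := if x = PySem.List.pyGetD [2,1,2,3,2,4,2,5] (PySem.Int.mod i 8) 0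
             then cor.set 1 (PySem.List.pyGetD cor 1 0 + 1) else cor
  let cor := if x = PySem.List.pyGetD [3,3,1,1,2,2,4,4,5,5] (PySem.Int.mod i 10) 0
             then cor.set 2 (PySem.List.pyGetD cor 2 0 + 1) else cor
  cor

theorem stepA_eq (answers cor : List Int) (i : Int) :
    stepA answers cor i = stepA' (PySem.List.pyGetD answers i 0) i cor := rfl

-- recursive view of an index loop over a list suffix
def loopI {β : Type} (g : β → Int → Int → β) : Nat → List Int → β → β
  | _, [], acc => acc
  | k, x :: r, acc => loopI g (k+1) r (g acc (k : Int) x)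

theorem fold_idx {β : Type} (xs : List Int) (g : β → Int → Int → β) :
    ∀ (n k : Nat) (acc : β), xs.length - k = n →
    (PySem.List.pyRange (k : Int) (xs.length : Int) 1).foldl
        (fun acc i => g acc i (PySem.List.pyGetD xs i 0)) acc
      = loopI g k (xs.drop k) acc := by
  intro n
  induction n with
  | zero =>
    intro k acc h
    have hk : xs.length ≤ k := by omega
    rw [PySem.List.pyRange_one_eq_nil (by exact_mod_cast hk), List.drop_eq_nil_of_le hk]
    rfl
  | succ n ih =>
    intro k acc h
    have hk : k < xs.length := by omega
    rw [PySem.List.pyRange_one_cons (by exact_mod_cast hk), List.drop_eq_getElem_cons hk]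
    simp only [List.foldl_cons, loopI]
    have hcast : ((k : Int) + 1) = ((k + 1 : Nat) : Int) := by push_cast; ring
    rw [hcast, ih (k+1) _ (by omega)]
    congr 1
    rw [PySem.List.pyGetD_natCast, List.getD_eq_getElem xs 0 hk]

-- per-pattern count of matches against pat cycled with period m, starting at position k
def cnt (pat : List Int) (m : Int) : Nat → List Int → Int
  | _, [] => 0
  | k, x :: r =>
    (if x = PySem.List.pyGetD pat (PySem.Int.mod (k : Int) m) 0 then 1 else 0)
      + cnt pat m (k+1) r

theorem A_decomp : ∀ (rest : List Int) (k : Nat) (a b c : Int),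
    loopI (fun cor i x => stepA' x i cor) k rest [a, b, c]
      = [a + cnt [1,2,3,4,5] 5 k rest,
         b + cnt [2,1,2,3,2,4,2,5] 8 k rest,
         c + cnt [3,3,1,1,2,2,4,4,5,5] 10 k rest] := by
  intro rest
  induction rest with
  | nil => intro k a b c; simp [loopI, cnt]
  | cons x r ih =>
    intro k a b c
    show loopI _ (k+1) r (stepA' x (k : Int) [a,b,c]) = _
    have hs : stepA' x (k : Int) [a,b,c] =
        [a + (if x = PySem.List.pyGetD [1,2,3,4,5] (PySem.Int.mod (k:Int) 5) 0 then 1 else 0),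
         b + (if x = PySem.List.pyGetD [2,1,2,3,2,4,2,5] (PySem.Int.mod (k:Int) 8) 0 then 1 else 0),
         c + (if x = PySem.List.pyGetD [3,3,1,1,2,2,4,4,5,5] (PySem.Int.mod (k:Int) 10) 0 then 1 else 0)] := by
      simp only [stepA']
      split_ifs <;> simp [PySem.List.pyGetD]
    rw [hs, ih]
    simp only [cnt, add_assoc]

-- when the remainder is empty, B's next step refills it: counting from [] = counting from pat
theorem fB_nil_refill (pat : List Int) (r : List Int) (c : Int) :
    (r.foldl (fB pat) (c, ([] : List Int))).1 = (r.foldl (fB pat) (c, pat)).1 := by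
  cases r with
  | nil => rfl
  | cons x r => simp [List.foldl_cons, fB]

theorem B_key (pat : List Int) (hp : pat ≠ []) :
    ∀ (rest : List Int) (k : Nat) (c : Int),
    (rest.foldl (fB pat) (c, pat.drop (k % pat.length))).1
      = c + cnt pat (pat.length : Int) k rest := by
  intro rest
  induction rest with
  | nil => intro k c; simp [cnt]
  | cons x r ih =>
    intro k c
    have hm : 0 < pat.length := List.length_pos_iff.mpr hp
    have hr : k % pat.length < pat.length := Nat.mod_lt _ hm
    rw [List.foldl_cons]
    have hne : (pat.drop (k % pat.length)).isEmpty = false := by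
      simp [List.isEmpty_eq_false_iff, List.drop_eq_nil_iff]; omega
    have hget : PySem.List.pyGetD (pat.drop (k % pat.length)) 0 0 = pat[k % pat.length] := by
      have h0 : (0:Nat) < (pat.drop (k % pat.length)).length := by
        simp [List.length_drop]; omega
      calc PySem.List.pyGetD (pat.drop (k % pat.length)) ((0:Nat) : Int) 0
          = (pat.drop (k % pat.length)).getD 0 0 := PySem.List.pyGetD_natCast _ 0 0
        _ = (pat.drop (k % pat.length))[0] := List.getD_eq_getElem _ 0 h0
        _ = pat[k % pat.length] := by simp
    have hcond : PySem.List.pyGetD pat (PySem.Int.mod (k : Int) (pat.length : Int)) 0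
        = pat[k % pat.length] := by
      rw [PySem.Int.mod_natCast, PySem.List.pyGetD_natCast, List.getD_eq_getElem pat 0 hr]
    have hstep : fB pat (c, pat.drop (k % pat.length)) x
        = (if x = pat[k % pat.length] then c + 1 else c, pat.drop (k % pat.length + 1)) := by
      simp only [fB, hne, if_neg Bool.false_ne_true, hget,
        PySem.List.slice_from_one, List.tail_drop]
    rw [hstep]
    simp only [cnt, hcond]
    rcases Nat.lt_or_ge (k % pat.length + 1) pat.length with hlt | hge
    · have hL2 : 1 < pat.length := by omega
      have hmod : (k+1) % pat.length = k % pat.length + 1 :=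
        calc (k+1) % pat.length = (k % pat.length + 1 % pat.length) % pat.length :=
              Nat.add_mod k 1 pat.length
          _ = (k % pat.length + 1) % pat.length := by rw [Nat.mod_eq_of_lt hL2]
          _ = k % pat.length + 1 := Nat.mod_eq_of_lt hlt
      rw [← hmod, ih (k+1)]
      split_ifs <;> ring
    · have heq : k % pat.length + 1 = pat.length := by omega
      have hmod : (k+1) % pat.length = 0 := by
        rcases Nat.lt_or_ge 1 pat.length with hL2 | hL1
        · calc (k+1) % pat.length = (k % pat.length + 1 % pat.length) % pat.length :=
                Nat.add_mod k 1 pat.length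
            _ = (k % pat.length + 1) % pat.length := by rw [Nat.mod_eq_of_lt hL2]
            _ = pat.length % pat.length := by rw [heq]
            _ = 0 := Nat.mod_self _
        · have h1 : pat.length = 1 := by omega
          simp [h1, Nat.mod_one]
      have ihk := ih (k+1) (if x = pat[k % pat.length] then c + 1 else c)
      rw [hmod] at ihk
      simp only [List.drop_zero] at ihk
      rw [heq, List.drop_length, fB_nil_refill, ihk]
      split_ifs <;> ring

theorem fold_idx0 {β : Type} (xs : List Int) (g : β → Int → Int → β) (acc : β) :
    (PySem.List.pyRange 0 (xs.length : Int) 1).foldl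
        (fun acc i => g acc i (PySem.List.pyGetD xs i 0)) acc
      = loopI g 0 xs acc := by
  have h := fold_idx xs g xs.length 0 acc rfl
  simpa using h

theorem cor_eq (answers : List Int) :
    (PySem.List.pyRange 0 (answers.length : Int) 1).foldl (stepA answers) [0,0,0]
      = [pyScore answers [1,2,3,4,5],
         pyScore answers [2,1,2,3,2,4,2,5],
         pyScore answers [3,3,1,1,2,2,4,4,5,5]] := by
  have hfun : (stepA answers) =
      (fun acc i => (fun cor i x => stepA' x i cor) acc i (PySem.List.pyGetD answers i 0)) := by
    funext cor i; exact stepA_eq answers cor i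
  rw [hfun, fold_idx0 answers (fun cor i x => stepA' x i cor) [0,0,0], A_decomp]
  have b1 := B_key [1,2,3,4,5] (by decide) answers 0 0
  have b2 := B_key [2,1,2,3,2,4,2,5] (by decide) answers 0 0
  have b3 := B_key [3,3,1,1,2,2,4,4,5,5] (by decide) answers 0 0
  simp only [Nat.zero_mod, List.drop_zero, zero_add, List.length_cons, List.length_nil] at b1 b2 b3
  norm_num at b1 b2 b3
  simp [pyScore, b1, b2, b3]

-- ===== VERDICT (by name: the statement is the Claim_ definition above) =====
theorem solution_spec : Claim_equal_solution := by
  intro answers _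
  unfold Spec_solution
  simp only [solution, solution_alt, cor_eq]
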